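-- pv_equiv track=rewrite | github.com/DBSI-study/kakao72 | 2018_kakao_blind_recruitment/news/kdj.py | changeMultipleSet
-- ===== SOURCE A (Python) =====
-- def changeMultipleSet(s):
--     s = s.lower()
--     arr = []
--     for i in range(len(s)-1):
--         arr.append(s[i:i+2])
--     new_arr = []
--     for i in arr:  # "문자가 아니면 제거"
--         if 97 <= ord(i[0]) <= 122 and 97 <= ord(i[1]) <= 122:
--             new_arr.append(i)
--     new_arr.sort()
--
--     return new_arr
-- ===== SOURCE B (Python) =====
-- def changeMultipleSet(s):
--     # Counting/bucket approach: tally alphabetic adjacent 2-grams once, then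
--     # emit buckets in lexicographic order (replaces building a list and sorting it).
--     t = s.lower()
--     counts = {}
--     for a, b in zip(t, t[1:]):
--         if 'a' <= a <= 'z' and 'a' <= b <= 'z':
--             g = a + b
--             counts[g] = counts.get(g, 0) + 1
--     out = []
--     for x in range(97, 123):
--         for y in range(97, 123):
--             g = chr(x) + chr(y)
--             out += [g] * counts.get(g, 0)
--     return out
-- ===== Notes on version B (the rewrite author's own statement) =====
-- stated objective: alternative
-- what changed: Replaces build-list-of-slices-then-comparison-sort with a single pass that counts alphabetic adjacent pairs in a dict and then emits the 26x26 buckets in lexicographic order (a counting/bucket sort).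
import Mathlib
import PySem

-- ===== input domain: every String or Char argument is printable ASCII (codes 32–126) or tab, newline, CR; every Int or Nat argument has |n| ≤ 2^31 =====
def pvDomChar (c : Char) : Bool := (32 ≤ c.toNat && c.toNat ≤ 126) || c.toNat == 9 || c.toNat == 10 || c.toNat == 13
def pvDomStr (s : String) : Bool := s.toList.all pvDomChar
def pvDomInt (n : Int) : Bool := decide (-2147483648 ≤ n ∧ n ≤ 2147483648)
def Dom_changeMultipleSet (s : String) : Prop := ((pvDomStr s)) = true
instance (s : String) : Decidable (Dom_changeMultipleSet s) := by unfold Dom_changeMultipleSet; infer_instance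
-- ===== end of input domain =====

-- B replaces A's build-slices-then-comparison-sort by a counting pass over adjacent
-- pairs plus emission of the 26×26 buckets in lexicographic order (a bucket sort).

-- ===== PORT A =====
def changeMultipleSet (s : String) : List String :=
  let t := PySem.Str.lower s
  let arr := (PySem.List.pyRange 0 ((PySem.Str.len t) - 1) 1).foldl
      (fun acc i => acc ++ [PySem.Str.slice t (some i) (some (i + 2))]) []
  let newArr := arr.foldl (fun acc g =>
      if 97 ≤ ((PySem.Str.pyGet? g 0).getD ' ').toNat ∧ ((PySem.Str.pyGet? g 0).getD ' ').toNat ≤ 122 ∧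
         97 ≤ ((PySem.Str.pyGet? g 1).getD ' ').toNat ∧ ((PySem.Str.pyGet? g 1).getD ' ').toNat ≤ 122
      then acc ++ [g] else acc) []
  PySem.List.sorted newArr (fun x => x) false

-- ===== PORT B =====
def pvGram (a b : Char) : String := String.ofList [a, b]

def changeMultipleSet_alt (s : String) : List String :=
  let t := (PySem.Str.lower s).toList
  let counts : PySem.Dict String Int := (t.zip t.tail).foldl (fun d p =>
      if 'a' ≤ p.1 ∧ p.1 ≤ 'z' ∧ 'a' ≤ p.2 ∧ p.2 ≤ 'z'
      then d.insert (pvGram p.1 p.2) (d.getD (pvGram p.1 p.2) 0 + 1) else d) PySem.Dict.empty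
  (PySem.List.pyRange 97 123 1).foldl (fun acc x =>
    (PySem.List.pyRange 97 123 1).foldl (fun acc y =>
      acc ++ List.replicate (counts.getD (pvGram (Char.ofNat x.toNat) (Char.ofNat y.toNat)) 0).toNat
        (pvGram (Char.ofNat x.toNat) (Char.ofNat y.toNat))) acc) []

-- ===== PRECONDITION & SPEC =====
def Spec_changeMultipleSet (s : String) (out : List String) : Prop := out = changeMultipleSet_alt s
instance (s : String) (out : List String) : Decidable (Spec_changeMultipleSet s out) := by unfold Spec_changeMultipleSet; infer_instance

-- ===== CLAIM (what is proved, stated in full; the proofs are below) =====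
def Claim_equal_changeMultipleSet : Prop := ∀ (s : String), Dom_changeMultipleSet s → Spec_changeMultipleSet s (changeMultipleSet s)

-- ===== LEMMAS AND PROOFS =====

-- the 676 candidate 2-grams, in the order B's nested loops visit them
def pvCands : List String :=
  (PySem.List.pyRange 97 123 1).flatMap (fun x =>
    (PySem.List.pyRange 97 123 1).map (fun y => pvGram (Char.ofNat x.toNat) (Char.ofNat y.toNat)))

-- the valid lowered 2-grams, in text order (what A keeps of its slices, before sorting)
def pvValid (p : Char × Char) : Bool := decide ('a' ≤ p.1 ∧ p.1 ≤ 'z' ∧ 'a' ≤ p.2 ∧ p.2 ≤ 'z')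

def pvGlist (t : List Char) : List String :=
  ((t.zip t.tail).filter pvValid).map (fun p => pvGram p.1 p.2)

theorem pv_toNat_ofNat (n : Nat) (h : n < 55296) : (Char.ofNat n).toNat = n := by
  have hv : n.isValidChar := Or.inl h
  simp [Char.ofNat, hv, Char.ofNatAux, Char.toNat]

theorem pv_char_lt (a b : Char) : a < b ↔ a.toNat < b.toNat := Iff.rfl

theorem pv_char_le (a b : Char) : a ≤ b ↔ a.toNat ≤ b.toNat := Iff.rfl

theorem pv_le97 (c : Char) : ('a' ≤ c) ↔ 97 ≤ c.toNat := by rw [pv_char_le]; simp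

theorem pv_le122 (c : Char) : (c ≤ 'z') ↔ c.toNat ≤ 122 := by rw [pv_char_le]; simp

theorem pv_gram_lt (a b c d : Char) :
    pvGram a b < pvGram c d ↔ (a < c ∨ (a = c ∧ b < d)) := by
  rw [pvGram, pvGram, String.lt_iff_toList_lt]
  simp [List.cons_lt_cons_iff]

-- B's nested appending loops are a double flatMap
theorem pv_nested {α β : Type} (L1 L2 : List α) (f : α → α → List β) (acc : List β) :
    L1.foldl (fun a x => L2.foldl (fun a y => a ++ f x y) a) acc
      = acc ++ L1.flatMap (fun x => L2.flatMap (f x)) := by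
  simp [List.flatMap_def]

-- the counting dict holds exactly the multiplicities of pvGlist
theorem pv_counts (t : List Char) (g : String) :
    ((t.zip t.tail).foldl (fun d p =>
        if 'a' ≤ p.1 ∧ p.1 ≤ 'z' ∧ 'a' ≤ p.2 ∧ p.2 ≤ 'z'
        then d.insert (pvGram p.1 p.2) (d.getD (pvGram p.1 p.2) 0 + 1) else d)
      (PySem.Dict.empty : PySem.Dict String Int)).getD g 0 = ((pvGlist t).count g : Int) := by
  have h1 : (t.zip t.tail).foldl (fun d p =>
        if 'a' ≤ p.1 ∧ p.1 ≤ 'z' ∧ 'a' ≤ p.2 ∧ p.2 ≤ 'z'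
        then d.insert (pvGram p.1 p.2) (d.getD (pvGram p.1 p.2) 0 + 1) else d)
      (PySem.Dict.empty : PySem.Dict String Int)
      = (((t.zip t.tail).filter pvValid).map (fun p => pvGram p.1 p.2)).foldl
          (fun d x => d.insert x (d.getD x 0 + 1)) PySem.Dict.empty := by
    rw [List.foldl_map, List.foldl_filter]
    simp [pvValid]
  rw [h1, PySem.Dict.getD_foldl_insert_add_one, PySem.Dict.getD_empty, zero_add, pvGlist]

-- emitting every candidate bucket is a permutation of the counted list
theorem pv_perm : ∀ (cands : List String), cands.Nodup → ∀ (l : List String),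
    (∀ x ∈ l, x ∈ cands) →
      (cands.flatMap (fun g => List.replicate (l.count g) g)).Perm l := by
  intro cands
  induction cands with
  | nil =>
    intro _ l hl
    have : l = [] := List.eq_nil_iff_forall_not_mem.mpr (fun x hx => by simpa using hl x hx)
    simp [this]
  | cons c cs ih =>
    intro hnd l hl
    obtain ⟨hc, hcs⟩ := List.nodup_cons.mp hnd
    rw [List.flatMap_cons]
    have hcongr : cs.flatMap (fun g => List.replicate (l.count g) g)
        = cs.flatMap (fun g => List.replicate ((l.filter (fun x => !(x == c))).count g) g) := by
      apply List.flatMap_congr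
      intro g hg
      rw [List.count_filter (by simp; intro h; exact hc (h ▸ hg))]
    have hperm' : ((cs.flatMap (fun g =>
        List.replicate ((l.filter (fun x => !(x == c))).count g) g))).Perm
        (l.filter (fun x => !(x == c))) := by
      apply ih hcs
      intro x hx
      have hxl : x ∈ l := List.mem_of_mem_filter hx
      have hxc : x ≠ c := by simpa using List.of_mem_filter hx
      rcases List.mem_cons.mp (hl x hxl) with h | h
      · exact absurd h hxc
      · exact h
    rw [hcongr, ← List.filter_beq]
    exact (List.Perm.append_left _ hperm').trans (List.filter_append_perm _ l)

-- bucket emission over a strictly increasing candidate list is sorted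
theorem pv_pairwise (cands : List String) (h : cands.Pairwise (· < ·)) (l : List String) :
    (cands.flatMap (fun g => List.replicate (l.count g) g)).Pairwise (fun a b => a ≤ b) := by
  rw [List.flatMap_def, List.pairwise_flatten]
  constructor
  · intro m hm
    obtain ⟨g, -, rfl⟩ := List.mem_map.mp hm
    rw [List.pairwise_replicate]
    exact Or.inr (le_refl g)
  · rw [List.pairwise_map]
    refine List.Pairwise.imp ?_ h
    intro g1 g2 hlt x hx y hy
    rw [List.eq_of_mem_replicate hx, List.eq_of_mem_replicate hy]
    exact le_of_lt hlt

theorem pv_sorted (cands l : List String) (h : cands.Pairwise (· < ·))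
    (hmem : ∀ x ∈ l, x ∈ cands) :
    PySem.List.sorted l (fun x => x) false
      = cands.flatMap (fun g => List.replicate (l.count g) g) :=
  PySem.List.sorted_id_eq_of_perm_of_pairwise _ _
    (pv_perm cands (h.imp ne_of_lt) l hmem) (pv_pairwise cands h l)

theorem pv_cands_pairwise : pvCands.Pairwise (· < ·) := by
  rw [pvCands, List.flatMap_def, List.pairwise_flatten]
  constructor
  · intro m hm
    obtain ⟨x, hx, rfl⟩ := List.mem_map.mp hm
    rw [List.pairwise_map]
    refine List.Pairwise.imp_of_mem ?_ (PySem.List.pairwise_lt_pyRange_one 97 123)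
    intro y1 y2 h1 h2 hlt
    have b1 := PySem.List.mem_pyRange_one.mp h1
    have b2 := PySem.List.mem_pyRange_one.mp h2
    rw [pv_gram_lt]
    refine Or.inr ⟨rfl, ?_⟩
    rw [pv_char_lt, pv_toNat_ofNat _ (by omega), pv_toNat_ofNat _ (by omega)]
    omega
  · rw [List.pairwise_map]
    refine List.Pairwise.imp_of_mem ?_ (PySem.List.pairwise_lt_pyRange_one 97 123)
    intro x1 x2 h1 h2 hlt u hu v hv
    obtain ⟨y1, hy1, rfl⟩ := List.mem_map.mp hu
    obtain ⟨y2, hy2, rfl⟩ := List.mem_map.mp hv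
    have b1 := PySem.List.mem_pyRange_one.mp h1
    have b2 := PySem.List.mem_pyRange_one.mp h2
    rw [pv_gram_lt]
    refine Or.inl ?_
    rw [pv_char_lt, pv_toNat_ofNat _ (by omega), pv_toNat_ofNat _ (by omega)]
    omega

theorem pv_mem_cands (a b : Char) (ha : 97 ≤ a.toNat) (ha' : a.toNat ≤ 122)
    (hb : 97 ≤ b.toNat) (hb' : b.toNat ≤ 122) : pvGram a b ∈ pvCands := by
  rw [pvCands, List.mem_flatMap]
  refine ⟨(a.toNat : Int), PySem.List.mem_pyRange_one.mpr (by omega), ?_⟩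
  rw [List.mem_map]
  refine ⟨(b.toNat : Int), PySem.List.mem_pyRange_one.mpr (by omega), ?_⟩
  rw [Int.toNat_natCast, Int.toNat_natCast, Char.ofNat_toNat, Char.ofNat_toNat]

-- A's slice-building loop followed by its filtering loop produces exactly pvGlist
theorem pv_A_newArr (s : String) :
    ((PySem.List.pyRange 0 ((PySem.Str.len (PySem.Str.lower s)) - 1) 1).foldl
        (fun acc i => acc ++ [PySem.Str.slice (PySem.Str.lower s) (some i) (some (i + 2))]) []).foldl
      (fun acc g =>
        if 97 ≤ ((PySem.Str.pyGet? g 0).getD ' ').toNat ∧ ((PySem.Str.pyGet? g 0).getD ' ').toNat ≤ 122 ∧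
           97 ≤ ((PySem.Str.pyGet? g 1).getD ' ').toNat ∧ ((PySem.Str.pyGet? g 1).getD ' ').toNat ≤ 122
        then acc ++ [g] else acc) []
      = pvGlist ((PySem.Str.lower s).toList) := by
  rw [PySem.List.foldl_append_singleton_eq_map, List.nil_append,
      PySem.List.foldl_append_ite_eq_filter, List.nil_append]
  set u := PySem.Str.lower s with hu
  set t := u.toList with ht
  cases hn : t.length with
  | zero =>
    have ht0 : t = [] := List.length_eq_zero_iff.mp hn
    have hlen : PySem.Str.len u - 1 = (-1 : Int) := by
      simp [PySem.Str.len, ← ht, ht0]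
    rw [hlen]
    have hr : PySem.List.pyRange 0 (-1) 1 = [] := by decide
    rw [hr]
    simp [pvGlist, ht0]
  | succ m =>
    have hlen : PySem.Str.len u - 1 = (m : Int) := by
      simp [PySem.Str.len, ← ht, hn]
    rw [hlen, PySem.List.pyRange_zero_natCast, List.map_map]
    have hmap : (List.range m).map ((fun i => PySem.Str.slice u (some i) (some (i + 2))) ∘ (fun k : Nat => (k : Int)))
        = (t.zip t.tail).map (fun p => pvGram p.1 p.2) := by
      apply List.ext_getElem
      · simp [List.length_zip, hn]
      · intro j hj hj2
        simp only [List.getElem_map, Function.comp_apply, List.getElem_range,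
          List.getElem_zip, List.getElem_tail]
        have hjm : j < m := by simpa using hj
        apply String.toList_inj.mp
        have h2 : ((j : Int) + 2) = ((j : Int) + ((2 : Nat) : Int)) := by norm_num
        rw [pvGram]
        simp only [PySem.Str.slice, String.toList_ofList]
        rw [h2]
        have hcs : PySem.Chars.slice u.toList (some ((j : Int))) (some ((j : Int) + ((2 : Nat) : Int)))
            = PySem.List.slice u.toList (some ((j : Int))) (some ((j : Int) + ((2 : Nat) : Int))) := rfl
        rw [hcs, PySem.List.slice_natCast_add]
        rw [List.drop_eq_getElem_cons (by omega : j < t.length), List.take_succ_cons,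
            List.drop_eq_getElem_cons (by omega : j + 1 < t.length), List.take_succ_cons,
            List.take_zero]
    rw [hmap, List.filter_map, pvGlist]
    congr 1
    apply List.filter_congr
    intro p hp
    simp only [Function.comp_apply, pvGram, pvValid]
    simp [PySem.Str.pyGet?, PySem.List.pyGet?, PySem.List.pyIdx?, pv_le97, pv_le122]

-- ===== VERDICT (by name: the statement is the Claim_ definition above) =====
theorem changeMultipleSet_spec : Claim_equal_changeMultipleSet := by
  intro s _
  show changeMultipleSet s = changeMultipleSet_alt s
  simp only [changeMultipleSet, changeMultipleSet_alt]
  rw [pv_A_newArr s, pv_nested]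
  have hmem : ∀ x ∈ pvGlist ((PySem.Str.lower s).toList), x ∈ pvCands := by
    intro x hx
    obtain ⟨p, hp, rfl⟩ := List.mem_map.mp hx
    have hv := (List.mem_filter.mp hp).2
    simp only [pvValid, decide_eq_true_eq] at hv
    exact pv_mem_cands p.1 p.2 ((pv_le97 p.1).mp hv.1) ((pv_le122 p.1).mp hv.2.1)
      ((pv_le97 p.2).mp hv.2.2.1) ((pv_le122 p.2).mp hv.2.2.2)
  rw [pv_sorted pvCands _ pv_cands_pairwise hmem]
  rw [pvCands, List.flatMap_assoc, List.nil_append]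
  refine List.flatMap_congr fun x _ => ?_
  rw [List.flatMap_map]
  refine List.flatMap_congr fun y _ => ?_
  rw [pv_counts, Int.toNat_natCast]
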